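-- pv_equiv track=rewrite | github.com/Kewton/MySwiftAgent | expertAgent/app/api/v1/marp_report_endpoints.py | _group_suggestions_by_task
-- ===== SOURCE A (Python) =====
-- from typing import Any
--
-- def _group_suggestions_by_task(
--     suggestions: list[dict[str, Any]], tasks: list[dict[str, Any]]
-- ) -> dict[str, list[dict[str, Any]]]:
--     """Group requirement relaxation suggestions by task.
--
--     Args:
--         suggestions: List of requirement relaxation suggestions
--         tasks: List of tasks from task_breakdown
--
--     Returns:
--         Dictionary mapping task names to matching suggestions
--     """
--     task_suggestions: dict[str, list[dict[str, Any]]] = {}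
--
--     for task in tasks:
--         task_name = task.get("task_name", "")
--         # Match suggestions where task_name appears in original_requirement
--         matching_suggestions = [
--             s
--             for s in suggestions
--             if task_name and task_name in s.get("original_requirement", "")
--         ]
--         task_suggestions[task_name] = matching_suggestions
--
--     return task_suggestions
-- ===== SOURCE B (Python) =====
-- def _group_suggestions_by_task(suggestions, tasks):
--     """Multi-pattern matching by sliding windows: instead of testing every task
--     name against every requirement, slide windows of the key lengths over each
--     requirement once and hash-look each window up among the task-name buckets."""
--     result = {task.get("task_name", ""): [] for task in tasks}
--     lengths = {len(name) for name in result if name}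
--     for s in suggestions:
--         req = s.get("original_requirement", "")
--         windows = {req[i:i + L] for L in lengths for i in range(len(req) - L + 1)}
--         for sub in windows:
--             if sub in result:
--                 result[sub].append(s)
--     return result
-- ===== Notes on version B (the rewrite author's own statement) =====
-- stated objective: alternative
-- what changed: Replaces A's per-task substring scan over all suggestions by a multi-pattern sliding-window matcher: seed a bucket per task name, collect the distinct lengths of the non-empty names, then for each suggestion enumerate the windows of those lengths over its requirement once and hash-look each window up among the buckets.
import Mathlib
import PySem

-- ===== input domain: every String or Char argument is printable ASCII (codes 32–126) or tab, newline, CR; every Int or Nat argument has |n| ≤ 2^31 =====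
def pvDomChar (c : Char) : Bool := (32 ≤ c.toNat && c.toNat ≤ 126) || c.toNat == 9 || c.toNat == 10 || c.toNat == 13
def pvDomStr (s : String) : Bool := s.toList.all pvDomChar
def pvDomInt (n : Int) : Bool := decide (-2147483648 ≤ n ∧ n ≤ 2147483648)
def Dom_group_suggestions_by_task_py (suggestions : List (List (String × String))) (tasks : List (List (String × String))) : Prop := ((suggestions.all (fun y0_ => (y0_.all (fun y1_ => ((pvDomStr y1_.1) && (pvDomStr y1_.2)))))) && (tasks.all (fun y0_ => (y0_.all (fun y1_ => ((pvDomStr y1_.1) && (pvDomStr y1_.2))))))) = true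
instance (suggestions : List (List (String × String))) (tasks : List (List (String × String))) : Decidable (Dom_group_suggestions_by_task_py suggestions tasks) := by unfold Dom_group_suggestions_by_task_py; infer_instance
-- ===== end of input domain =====

-- B replaces A's per-task substring scan by multi-pattern sliding-window matching:
-- it slides windows of the distinct key lengths over each requirement once and
-- hash-looks each window up among the task-name buckets (alternative algorithm,
-- same return value).

-- shared field accessors (task.get("task_name","") / s.get("original_requirement",""))
def pvTaskName (task : List (String × String)) : String :=
  (PySem.Dict.mk task).getD "task_name" ""

def pvReq (s : List (String × String)) : String :=
  (PySem.Dict.mk s).getD "original_requirement" ""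

-- ===== PORT A =====
-- literal transliteration of A: one dict, for each task insert the filtered suggestion list
def group_suggestions_by_task_py (suggestions : List (List (String × String))) (tasks : List (List (String × String))) : List (String × List (List (String × String))) :=
  (tasks.foldl
    (fun d task =>
      d.insert (pvTaskName task)
        (suggestions.filter (fun s =>
          decide (pvTaskName task ≠ "") && PySem.Str.isIn (pvTaskName task) (pvReq s))))
    PySem.Dict.empty).items

-- ===== PORT B =====
-- {req[i:i+L] for L in lengths for i in range(len(req) - L + 1)}
def pvWindows (lengths : List Int) (req : String) : List String :=
  PySem.Set.ofList (lengths.flatMap (fun L =>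
    (PySem.List.pyRange 0 (PySem.Str.len req - L + 1) 1).map (fun i =>
      PySem.Str.slice req (some i) (some (i + L)))))

-- literal transliteration of B: seed one empty bucket per task name, collect the
-- distinct lengths of the non-empty keys, then for each suggestion slide windows of
-- those lengths over its requirement and append it to each bucket whose key shows up
def group_suggestions_by_task_py_alt (suggestions : List (List (String × String))) (tasks : List (List (String × String))) : List (String × List (List (String × String))) :=
  let result := tasks.foldl
    (fun d task => d.insert (pvTaskName task) ([] : List (List (String × String))))
    PySem.Dict.empty
  let lengths := PySem.Set.ofList
    ((result.keys.filter (fun n => decide (n ≠ ""))).map (fun n => PySem.Str.len n))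
  let final := suggestions.foldl
    (fun d s =>
      (pvWindows lengths (pvReq s)).foldl
        (fun d' sub =>
          if d'.contains sub then d'.modify sub [] (· ++ [s]) else d')
        d)
    result
  final.items

-- ===== PRECONDITION & SPEC =====
def Spec_group_suggestions_by_task_py (suggestions : List (List (String × String))) (tasks : List (List (String × String))) (out : List (String × List (List (String × String)))) : Prop := out = group_suggestions_by_task_py_alt suggestions tasks
instance (suggestions : List (List (String × String))) (tasks : List (List (String × String))) (out : List (String × List (List (String × String)))) : Decidable (Spec_group_suggestions_by_task_py suggestions tasks out) := by unfold Spec_group_suggestions_by_task_py; infer_instance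

-- ===== CLAIM (what is proved, stated in full; the proofs are below) =====
def Claim_equal_group_suggestions_by_task_py : Prop := ∀ (suggestions : List (List (String × String))) (tasks : List (List (String × String))), Dom_group_suggestions_by_task_py suggestions tasks → Spec_group_suggestions_by_task_py suggestions tasks (group_suggestions_by_task_py suggestions tasks)

-- ===== LEMMAS AND PROOFS =====

-- the bucket A computes for a task name (depends only on the name)
def pvMatch (suggestions : List (List (String × String))) (n : String) : List (List (String × String)) :=
  suggestions.filter (fun s => decide (n ≠ "") && PySem.Str.isIn n (pvReq s))

-- A's insert loop: last write wins, but the written value depends only on the key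
lemma A_foldl_getD (sugg : List (List (String × String))) (l : List (List (String × String)))
    (d : PySem.Dict String (List (List (String × String)))) (k : String) :
    (l.foldl (fun d task =>
        d.insert (pvTaskName task)
          (sugg.filter (fun s =>
            decide (pvTaskName task ≠ "") && PySem.Str.isIn (pvTaskName task) (pvReq s)))) d).getD k []
      = if k ∈ l.map pvTaskName then pvMatch sugg k else d.getD k [] := by
  induction l generalizing d with
  | nil => simp
  | cons a l ih =>
    simp only [List.foldl_cons, List.map_cons, List.mem_cons, ih, PySem.Dict.getD_insert]
    by_cases h1 : k ∈ l.map pvTaskName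
    · simp [h1]
    · by_cases h2 : k = pvTaskName a <;> simp [h1, h2, pvMatch]

-- B's seeding loop: every bucket starts empty
lemma d0_foldl_getD (l : List (List (String × String)))
    (d : PySem.Dict String (List (List (String × String)))) (k : String) :
    (l.foldl (fun d task => d.insert (pvTaskName task) ([] : List (List (String × String)))) d).getD k []
      = if k ∈ l.map pvTaskName then [] else d.getD k [] := by
  induction l generalizing d with
  | nil => simp
  | cons a l ih =>
    simp only [List.foldl_cons, List.map_cons, List.mem_cons, ih, PySem.Dict.getD_insert]
    by_cases h1 : k ∈ l.map pvTaskName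
    · simp [h1]
    · by_cases h2 : k = pvTaskName a <;> simp [h1, h2]

-- B's window loop leaves the key set unchanged (the contains guard only touches existing keys)
lemma inner_keys (s : List (String × String)) (L : List String)
    (d : PySem.Dict String (List (List (String × String)))) :
    (L.foldl (fun d' sub =>
        if d'.contains sub then d'.modify sub [] (· ++ [s]) else d') d).keys = d.keys := by
  induction L generalizing d with
  | nil => simp
  | cons n L ih =>
    simp only [List.foldl_cons]
    by_cases hc : d.contains n = true
    · rw [if_pos hc, ih]
      rw [PySem.Dict.keys_modify, PySem.Dict.keys_insert_of_contains d _ hc]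
    · rw [if_neg hc, ih]

-- B's window loop appends the suggestion to exactly the buckets whose key is a window
lemma inner_getD (s : List (String × String)) (L : List String)
    (d : PySem.Dict String (List (List (String × String)))) (hnd : L.Nodup) (k : String) :
    (L.foldl (fun d' sub =>
        if d'.contains sub then d'.modify sub [] (· ++ [s]) else d') d).getD k []
      = d.getD k [] ++ (if k ∈ L ∧ d.contains k = true then [s] else []) := by
  induction L generalizing d with
  | nil => simp
  | cons n L ih =>
    rcases List.nodup_cons.1 hnd with ⟨hn, hndL⟩
    simp only [List.foldl_cons]
    by_cases hc : d.contains n = true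
    · rw [if_pos hc, ih _ hndL]
      have hck : (d.modify n [] (· ++ [s])).contains k = d.contains k := by
        rw [PySem.Dict.contains_modify]
        by_cases h2 : k = n
        · subst h2; simp [hc]
        · simp [h2]
      rw [hck, PySem.Dict.getD_modify]
      by_cases h2 : k = n
      · subst h2
        rw [if_pos rfl, if_neg (fun h => hn h.1), if_pos ⟨List.mem_cons_self, hc⟩]
        simp
      · rw [if_neg h2]
        congr 1
        exact if_congr (by simp [List.mem_cons, h2]) rfl rfl
    · rw [if_neg hc, ih _ hndL]
      congr 1
      apply if_congr _ rfl rfl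
      constructor
      · rintro ⟨h1, h2⟩; exact ⟨List.mem_cons_of_mem _ h1, h2⟩
      · rintro ⟨h1, h2⟩
        rcases List.mem_cons.1 h1 with h1 | h1
        · subst h1; exact absurd h2 (by simp [hc])
        · exact ⟨h1, h2⟩

-- B's outer loop keeps the key set of the seeded dict
lemma outer_keys (lengths : List Int) (ss : List (List (String × String)))
    (d : PySem.Dict String (List (List (String × String)))) :
    (ss.foldl (fun d s =>
        (pvWindows lengths (pvReq s)).foldl (fun d' sub =>
          if d'.contains sub then d'.modify sub [] (· ++ [s]) else d') d) d).keys = d.keys := by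
  induction ss generalizing d with
  | nil => rfl
  | cons s ss ih =>
    simp only [List.foldl_cons]
    rw [ih, inner_keys]

-- B's outer loop: each existing bucket collects exactly the suggestions whose
-- requirement has the key among its windows
lemma outer_getD (lengths : List Int) (ss : List (List (String × String)))
    (d : PySem.Dict String (List (List (String × String)))) (k : String)
    (hk : d.contains k = true) :
    (ss.foldl (fun d s =>
        (pvWindows lengths (pvReq s)).foldl (fun d' sub =>
          if d'.contains sub then d'.modify sub [] (· ++ [s]) else d') d) d).getD k []
      = d.getD k [] ++ ss.filter (fun s => decide (k ∈ pvWindows lengths (pvReq s))) := by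
  induction ss generalizing d with
  | nil => simp
  | cons s ss ih =>
    simp only [List.foldl_cons]
    have hnd : (pvWindows lengths (pvReq s)).Nodup := PySem.Set.nodup_ofList _
    have hk1 : ((pvWindows lengths (pvReq s)).foldl (fun d' sub =>
        if d'.contains sub then d'.modify sub [] (· ++ [s]) else d') d).contains k = true := by
      rw [PySem.Dict.contains_iff_mem_keys] at hk ⊢
      rw [inner_keys]; exact hk
    rw [ih _ hk1, inner_getD s _ d hnd k, List.filter_cons]
    by_cases hw : k ∈ pvWindows lengths (pvReq s)
    · rw [if_pos ⟨hw, hk⟩, if_pos (by simpa using hw)]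
      simp
    · rw [if_neg (fun h => hw h.1), if_neg (by simpa using hw)]
      simp

-- window characterization: a seeded non-empty key is a window of req iff it is a substring
lemma mem_windows (lengths : List Int) (req k : String)
    (hpos : ∀ L ∈ lengths, 0 < L) (hk : k ≠ "" → PySem.Str.len k ∈ lengths) :
    k ∈ pvWindows lengths req ↔ (k ≠ "" ∧ PySem.Str.isIn k req = true) := by
  have hlen : PySem.Str.len req = (req.toList.length : Int) := by
    simp [PySem.Str.len]
  have hlenk : PySem.Str.len k = (k.toList.length : Int) := by
    simp [PySem.Str.len]
  unfold pvWindows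
  rw [PySem.Set.mem_ofList, List.mem_flatMap]
  constructor
  · rintro ⟨L, hL, hmem⟩
    rcases List.mem_map.1 hmem with ⟨i, hi, hsl⟩
    rcases PySem.List.mem_pyRange_one.1 hi with ⟨h0i, hiu⟩
    have hLpos := hpos L hL
    rw [hlen] at hiu
    have hkl : k.toList = (req.toList.drop i.toNat).take ((i + L).toNat - i.toNat) := by
      rw [← hsl, PySem.Str.toList_slice, PySem.Chars.slice_eq_listSlice,
          PySem.List.slice_toNat _ h0i (by omega)]
    have hlen1 : k.toList.length = L.toNat := by
      rw [hkl]
      simp only [String.length_toList] at hiu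
      simp
      omega
    have hne : k ≠ "" := by
      intro h
      subst h
      simp at hlen1
      omega
    refine ⟨hne, ?_⟩
    rw [PySem.Str.isIn_iff_infix, hkl]
    exact ((List.take_prefix _ _).isInfix).trans ((List.drop_suffix _ _).isInfix)
  · rintro ⟨hne, hin⟩
    rcases PySem.Str.isIn_iff_infix k req |>.1 hin with ⟨u, v, huv⟩
    have hreq : req.toList = u ++ (k.toList ++ v) := by rw [← huv]; simp
    refine ⟨PySem.Str.len k, hk hne, List.mem_map.2 ⟨(u.length : Int), ?_, ?_⟩⟩
    · rw [PySem.List.mem_pyRange_one, hlen, hlenk]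
      constructor
      · positivity
      · have : req.toList.length = u.length + (k.toList.length + v.length) := by
          rw [hreq]; simp
        omega
    · apply String.toList_inj.mp
      rw [PySem.Str.toList_slice, PySem.Chars.slice_eq_listSlice, hlenk,
          PySem.List.slice_natCast_add, hreq, List.drop_left, List.take_left]

-- ===== VERDICT (by name: the statement is the Claim_ definition above) =====
theorem group_suggestions_by_task_py_spec : Claim_equal_group_suggestions_by_task_py := by
  intro suggestions tasks _
  unfold Spec_group_suggestions_by_task_py
  unfold group_suggestions_by_task_py group_suggestions_by_task_py_alt
  set dA := tasks.foldl
    (fun d task =>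
      d.insert (pvTaskName task)
        (suggestions.filter (fun s =>
          decide (pvTaskName task ≠ "") && PySem.Str.isIn (pvTaskName task) (pvReq s))))
    PySem.Dict.empty with hdA
  set d0 := tasks.foldl
    (fun d task => d.insert (pvTaskName task) ([] : List (List (String × String))))
    PySem.Dict.empty with hd0
  set lengths := PySem.Set.ofList
    ((d0.keys.filter (fun n => decide (n ≠ ""))).map (fun n => PySem.Str.len n)) with hlens
  set final := suggestions.foldl
    (fun d s =>
      (pvWindows lengths (pvReq s)).foldl
        (fun d' sub =>
          if d'.contains sub then d'.modify sub [] (· ++ [s]) else d')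
        d)
    d0 with hfinal
  have hkA : dA.keys = PySem.Set.ofList (tasks.map pvTaskName) := by
    rw [hdA, PySem.Dict.keys_foldl_insert_key tasks pvTaskName _ _, PySem.Dict.keys_empty]
    rfl
  have hk0 : d0.keys = PySem.Set.ofList (tasks.map pvTaskName) := by
    rw [hd0, PySem.Dict.keys_foldl_insert_key tasks pvTaskName _ _, PySem.Dict.keys_empty]
    rfl
  have hkF : final.keys = d0.keys := by rw [hfinal]; exact outer_keys lengths suggestions d0
  have hndA : dA.keys.Nodup := by
    rw [hdA]; exact PySem.Dict.nodup_keys_foldl_insert_key tasks pvTaskName _ _ (by simp)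
  have hnd0 : d0.keys.Nodup := by
    rw [hd0]; exact PySem.Dict.nodup_keys_foldl_insert_key tasks pvTaskName _ _ (by simp)
  have hpos : ∀ L ∈ lengths, 0 < L := by
    intro L hL
    rw [hlens, PySem.Set.mem_ofList] at hL
    rcases List.mem_map.1 hL with ⟨n, hn, hLn⟩
    rcases List.mem_filter.1 hn with ⟨-, hn2⟩
    have hne : n ≠ "" := by simpa using hn2
    have : n.toList ≠ [] := fun h => hne (String.toList_inj.mp (by simpa using h))
    have : 0 < n.toList.length := List.length_pos_iff.2 this
    rw [String.length_toList] at this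
    rw [← hLn]
    simp [PySem.Str.len]
    omega
  rw [PySem.Dict.items_eq_map_keys dA hndA [],
      PySem.Dict.items_eq_map_keys final (by rw [hkF]; exact hnd0) [],
      hkF, hkA, hk0]
  apply List.map_congr_left
  intro k hkmem
  have hkmem' : k ∈ tasks.map pvTaskName := (PySem.Set.mem_ofList _ k).1 hkmem
  have hkd0 : k ∈ d0.keys := by rw [hk0]; exact hkmem
  have hk : k ≠ "" → PySem.Str.len k ∈ lengths := by
    intro hne
    rw [hlens, PySem.Set.mem_ofList]
    exact List.mem_map.2 ⟨k, List.mem_filter.2 ⟨hkd0, by simpa using hne⟩, rfl⟩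
  have hA : dA.getD k [] = pvMatch suggestions k := by
    rw [hdA, A_foldl_getD, if_pos hkmem']
  have hB : final.getD k [] = pvMatch suggestions k := by
    rw [hfinal, outer_getD lengths suggestions d0 k
          ((PySem.Dict.contains_iff_mem_keys d0 k).2 hkd0),
        hd0, d0_foldl_getD, if_pos hkmem']
    rw [List.nil_append]
    unfold pvMatch
    apply List.filter_congr
    intro s _
    have hmw := mem_windows lengths (pvReq s) k hpos hk
    rw [Bool.eq_iff_iff]
    simp only [decide_eq_true_eq, Bool.and_eq_true]
    rw [hmw]
  rw [hA, hB]
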